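-- pv_equiv track=rewrite | github.com/EvanTian233/Leetcode-solutions | Python_Solutions/DataStructure/2_String/StringShift.py | stringShift
-- ===== SOURCE A (Python) =====
-- from typing import List
--
-- def stringShift(s: str, shift: List[List[int]]) -> str:
--     # Better syntax
--     left = 0
--     for d, a in shift:
--         if d:
--             left -= a
--         else:
--             left += a
--     left %= len(s)
--     return s[left:] + s[:left]
-- ===== SOURCE B (Python) =====
-- from collections import deque
--
-- def stringShift(s, shift):
--     dq = deque(s)
--     for d, a in shift:
--         dq.rotate(a if d else -a)
--     return ''.join(dq)
-- ===== Notes on version B (the rewrite author's own statement) =====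
-- stated objective: alternative
-- what changed: Instead of accumulating a single net offset and slicing once, B builds a deque and applies each shift command as a rotation (deque.rotate), joining at the end.
import Mathlib
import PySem

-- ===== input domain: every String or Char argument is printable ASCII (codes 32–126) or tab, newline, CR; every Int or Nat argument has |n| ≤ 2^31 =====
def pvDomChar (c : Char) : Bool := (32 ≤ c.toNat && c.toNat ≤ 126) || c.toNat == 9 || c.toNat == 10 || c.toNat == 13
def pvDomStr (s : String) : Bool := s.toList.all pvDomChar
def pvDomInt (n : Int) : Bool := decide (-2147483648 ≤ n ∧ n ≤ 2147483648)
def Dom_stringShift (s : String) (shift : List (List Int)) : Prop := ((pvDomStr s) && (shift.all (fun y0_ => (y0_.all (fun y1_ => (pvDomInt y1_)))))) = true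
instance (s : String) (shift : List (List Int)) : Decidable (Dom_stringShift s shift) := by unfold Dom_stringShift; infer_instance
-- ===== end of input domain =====

-- B applies each shift as a deque rotation instead of slicing once by a net offset (objective: alternative).

-- ===== PORT A =====
-- `for d, a in shift` accumulating a signed net left offset, then `left %= len(s)` and
-- the two slices `s[left:] + s[:left]` (string concatenation ported as list append + ofList).
def stringShift (s : String) (shift : List (List Int)) : String :=
  let left : Int := shift.foldl (fun left row =>
    match row with
    | [d, a] => if d ≠ 0 then left - a else left + a
    | _ => left) 0
  let cs := s.toList
  let left := PySem.Int.mod left cs.length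
  String.ofList (PySem.List.slice cs (some left) none ++ PySem.List.slice cs none (some left))

-- ===== PORT B =====
-- deque.rotate(k): right rotation by k (k may be negative); on the empty deque it is a no-op.
def pyRotate (l : List Char) (k : Int) : List Char :=
  if l.length = 0 then l else l.rotate (PySem.Int.mod (-k) l.length).toNat

def stringShift_alt (s : String) (shift : List (List Int)) : String :=
  String.ofList (shift.foldl (fun dq row =>
    -- `d, a = row` ported via indexing: defined exactly when the row is a pair
    match row[0]?, row[1]?, row[2]? with
    | some d, some a, none => pyRotate dq (if d ≠ 0 then a else -a)
    | _, _, _ => dq) s.toList)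

-- ===== PRECONDITION & SPEC =====
-- Pre_ excludes exactly the inputs where Python A raises: s = '' (ZeroDivisionError from
-- `left %= len(s)`) and rows that are not pairs (ValueError when unpacking `d, a`).
def Pre_stringShift (s : String) (shift : List (List Int)) : Prop :=
  s.toList ≠ [] ∧ ∀ row ∈ shift, row.length = 2
instance (s : String) (shift : List (List Int)) : Decidable (Pre_stringShift s shift) := by
  unfold Pre_stringShift; infer_instance
def pvWitness_stringShift : String × List (List Int) := ("abcdef", [[0, 2], [1, 7], [0, -3]])

def Spec_stringShift (s : String) (shift : List (List Int)) (out : String) : Prop := out = stringShift_alt s shift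
instance (s : String) (shift : List (List Int)) (out : String) : Decidable (Spec_stringShift s shift out) := by unfold Spec_stringShift; infer_instance

-- ===== CLAIM (what is proved, stated in full; the proofs are below) =====
def Claim_equal_stringShift : Prop := ∀ (s : String) (shift : List (List Int)), Dom_stringShift s shift → Pre_stringShift s shift → Spec_stringShift s shift (stringShift s shift)
-- ===== LEMMAS AND PROOFS =====

-- the signed right-rotation amount of one row, and its recursive sum
def rowAmt (row : List Int) : Int :=
  match row with
  | [d, a] => if d ≠ 0 then a else -a
  | _ => 0

def rotSum : List (List Int) → Int
  | [] => 0
  | r :: rs => rowAmt r + rotSum rs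

theorem mod_nonneg_lt (a n : Int) (hn : 0 < n) :
    0 ≤ PySem.Int.mod a n ∧ PySem.Int.mod a n < n := by
  rw [PySem.Int.mod_eq_emod_of_pos hn]
  exact ⟨Int.emod_nonneg a (by omega), Int.emod_lt_of_pos a hn⟩

theorem pyRotate_pyRotate (l : List Char) (j k : Int) :
    pyRotate (pyRotate l j) k = pyRotate l (j + k) := by
  unfold pyRotate
  rcases Nat.eq_zero_or_pos l.length with h0 | hpos
  · simp [h0]
  · have hn : (0:Int) < (l.length : Int) := by exact_mod_cast hpos
    simp only [List.length_rotate, Nat.pos_iff_ne_zero.mp hpos, if_false]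
    rw [List.rotate_rotate]
    obtain ⟨hx, hx'⟩ := mod_nonneg_lt (-j) _ hn
    obtain ⟨hy, hy'⟩ := mod_nonneg_lt (-k) _ hn
    obtain ⟨hz, hz'⟩ := mod_nonneg_lt (-(j+k)) _ hn
    set x := PySem.Int.mod (-j) (l.length : Int) with hxdef
    set y := PySem.Int.mod (-k) (l.length : Int) with hydef
    set z := PySem.Int.mod (-(j+k)) (l.length : Int) with hzdef
    have hsum : z = (x + y) % (l.length : Int) := by
      rw [hxdef, hydef, hzdef, PySem.Int.mod_eq_emod_of_pos hn, PySem.Int.mod_eq_emod_of_pos hn,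
          PySem.Int.mod_eq_emod_of_pos hn, ← Int.add_emod]
      congr 1; ring
    have hzchar : z = x + y ∨ z = x + y - (l.length : Int) := by
      rcases lt_or_ge (x + y) (l.length : Int) with h | h
      · left; rw [hsum, Int.emod_eq_of_lt (by omega) h]
      · right
        have e : (x + y + (l.length : Int) * (-1)) % (l.length : Int) = (x + y) % (l.length : Int) :=
          Int.add_mul_emod_self_left (x + y) (l.length : Int) (-1)
        have e2 : x + y + (l.length : Int) * (-1) = x + y - (l.length : Int) := by ring
        rw [hsum, ← e, e2, Int.emod_eq_of_lt (by omega) (by omega)]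
    -- reduce the Nat rotation amounts
    rcases lt_or_ge (x.toNat + y.toNat) l.length with h | h
    · have hz_eq : z = x + y := by omega
      congr 1; omega
    · rw [← List.rotate_mod, Nat.mod_eq_sub_mod h,
          Nat.mod_eq_of_lt (by omega : x.toNat + y.toNat - l.length < l.length)]
      congr 1; omega

theorem pyRotate_zero (l : List Char) : pyRotate l 0 = l := by
  unfold pyRotate
  rcases Nat.eq_zero_or_pos l.length with h0 | hpos
  · simp [h0]
  · have hn : (0:Int) < (l.length : Int) := by exact_mod_cast hpos
    rw [if_neg (Nat.pos_iff_ne_zero.mp hpos)]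
    rw [show (-(0:Int)) = 0 from by ring, PySem.Int.mod_eq_emod_of_pos hn]
    simp

theorem foldB_eq (shift : List (List Int)) :
    ∀ l : List Char,
      shift.foldl (fun dq row =>
        match row[0]?, row[1]?, row[2]? with
        | some d, some a, none => pyRotate dq (if d ≠ 0 then a else -a)
        | _, _, _ => dq) l = pyRotate l (rotSum shift) := by
  induction shift with
  | nil => intro l; simp [rotSum, pyRotate_zero]
  | cons r rs ih =>
    intro l
    rw [List.foldl_cons, ih, rotSum]
    match r with
    | [] => simp [rowAmt]
    | [d] => simp [rowAmt]
    | [d, a] => simp only [rowAmt]; simp only [List.getElem?_cons_zero, List.getElem?_cons_succ,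
        List.getElem?_nil]; rw [pyRotate_pyRotate]
    | d :: a :: x :: rest => simp [rowAmt]

theorem foldA_eq (shift : List (List Int)) :
    ∀ acc : Int,
      shift.foldl (fun left row =>
        match row with
        | [d, a] => if d ≠ 0 then left - a else left + a
        | _ => left) acc = acc - rotSum shift := by
  induction shift with
  | nil => intro acc; simp [rotSum]
  | cons r rs ih =>
    intro acc
    rw [List.foldl_cons, ih, rotSum]
    match r with
    | [] => simp [rowAmt]
    | [d] => simp [rowAmt]
    | [d, a] => simp only [rowAmt]; split_ifs <;> ring
    | d :: a :: x :: rest => simp [rowAmt]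

-- ===== VERDICT (by name: the statement is the Claim_ definition above) =====
theorem stringShift_spec : Claim_equal_stringShift := by
  intro s shift _ hpre
  unfold Spec_stringShift stringShift stringShift_alt
  rw [foldA_eq, foldB_eq]
  dsimp only
  have hne : s.toList ≠ [] := hpre.1
  have hpos : 0 < s.toList.length := List.length_pos_iff.mpr hne
  have hn : (0:Int) < (s.toList.length : Int) := by exact_mod_cast hpos
  obtain ⟨hm, hm'⟩ := mod_nonneg_lt (0 - rotSum shift) _ hn
  set m := PySem.Int.mod (0 - rotSum shift) (s.toList.length : Int) with hmdef
  unfold pyRotate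
  rw [if_neg (Nat.pos_iff_ne_zero.mp hpos)]
  have harg : PySem.Int.mod (-rotSum shift) (s.toList.length : Int) = m := by
    rw [hmdef]; congr 1; ring
  rw [harg]
  congr 1
  rw [PySem.List.slice_from _ hm, PySem.List.slice_to _ hm]
  rw [List.rotate_eq_drop_append_take (by omega : m.toNat ≤ s.toList.length)]
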